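-- pv_equiv track=rewrite | github.com/pkhaneff/lingerK_Voice | app/api/services/semantic/punctuation_restorer.py | _restore_rule_based
-- ===== SOURCE A (Python) =====
-- def _restore_rule_based(text: str) -> str:
--     words = text.split()
--     result = []
--
--     for i, word in enumerate(words):
--         result.append(word)
--
--         if (i + 1) % 15 == 0 and i < len(words) - 1:
--             if not word.endswith(('.', '!', '?', ',')):
--                 result[-1] = word + '.'
--
--     if result and not result[-1].endswith(('.', '!', '?')):
--         result[-1] = result[-1] + '.'
--
--     return ' '.join(result)
-- ===== SOURCE B (Python) =====
-- def _restore_rule_based(text: str) -> str: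
--     words = text.split()
--     if not words:
--         return ''
--     n = len(words)
--     out = []
--     for start in range(0, n, 15):
--         group = words[start:start + 15]
--         if start + 15 < n and not group[-1].endswith(('.', '!', '?', ',')):
--             group[-1] = group[-1] + '.'
--         out.extend(group)
--     if not out[-1].endswith(('.', '!', '?')):
--         out[-1] = out[-1] + '.'
--     return ' '.join(out)
-- ===== Notes on version B (the rewrite author's own statement) =====
-- stated objective: alternative
-- what changed: Replaces the single enumerate pass with in-place mutation of the growing result list by chunked slicing: iterate over range(0, n, 15), take 15-word slices, dot the last word of each non-final chunk, and apply the final-word rule once at the end.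
import Mathlib
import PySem

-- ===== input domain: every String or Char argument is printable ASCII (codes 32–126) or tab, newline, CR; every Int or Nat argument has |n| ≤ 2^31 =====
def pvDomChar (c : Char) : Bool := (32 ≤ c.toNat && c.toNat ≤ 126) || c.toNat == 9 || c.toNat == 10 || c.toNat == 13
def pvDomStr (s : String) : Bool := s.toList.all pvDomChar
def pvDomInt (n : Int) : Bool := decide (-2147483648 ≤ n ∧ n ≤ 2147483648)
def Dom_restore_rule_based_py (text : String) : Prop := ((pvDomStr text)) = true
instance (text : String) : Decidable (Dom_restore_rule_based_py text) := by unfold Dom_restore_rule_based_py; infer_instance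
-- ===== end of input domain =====

-- B re-implements A by chunked slicing over range(0, n, 15) instead of A's single
-- enumerate pass with index arithmetic; same cost, different decomposition (alternative).

-- word.endswith(('.', '!', '?', ',')) — the tuple test both Pythons use in the loop
def pvEnds4 (w : String) : Bool :=
  PySem.Str.endswith w "." || PySem.Str.endswith w "!" || PySem.Str.endswith w "?" || PySem.Str.endswith w ","

-- word.endswith(('.', '!', '?')) — the final-word test
def pvEnds3 (w : String) : Bool :=
  PySem.Str.endswith w "." || PySem.Str.endswith w "!" || PySem.Str.endswith w "?"

-- ===== PORT A =====
-- A's loop body: append the word, then possibly overwrite result[-1] with word + '.'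
def pvStepA (N : Int) (result : List String) (iw : Int × String) : List String :=
  let result := result ++ [iw.2]
  if PySem.Int.mod (iw.1 + 1) 15 = 0 ∧ iw.1 < N - 1 then
    if pvEnds4 iw.2 = false then result.dropLast ++ [iw.2 ++ "."] else result
  else result

def restore_rule_based_py (text : String) : String :=
  let words := PySem.Str.split₀ text
  let result := (PySem.List.enumerate words).foldl (pvStepA (words.length : Int)) []
  let result :=
    if result ≠ [] ∧ pvEnds3 (PySem.List.pyGetD result (-1) "") = false then
      result.dropLast ++ [PySem.List.pyGetD result (-1) "" ++ "."]
    else result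
  PySem.Str.join " " result

-- ===== PORT B =====
-- B's loop body: slice a 15-word group, dot its last word if the chunk is not final, extend out
def pvStepB (words : List String) (out : List String) (start : Int) : List String :=
  let group := PySem.List.slice words (some start) (some (start + 15))
  if start + 15 < (words.length : Int) ∧ pvEnds4 (PySem.List.pyGetD group (-1) "") = false then
    out ++ (group.dropLast ++ [PySem.List.pyGetD group (-1) "" ++ "."])
  else out ++ group

def restore_rule_based_py_alt (text : String) : String :=
  let words := PySem.Str.split₀ text
  if words = [] then "" else
  let out := (PySem.List.pyRange 0 (words.length : Int) 15).foldl (pvStepB words) []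
  let out :=
    if pvEnds3 (PySem.List.pyGetD out (-1) "") = false then
      out.dropLast ++ [PySem.List.pyGetD out (-1) "" ++ "."]
    else out
  PySem.Str.join " " out

-- ===== PRECONDITION & SPEC =====
def Spec_restore_rule_based_py (text : String) (out : String) : Prop := out = restore_rule_based_py_alt text
instance (text : String) (out : String) : Decidable (Spec_restore_rule_based_py text out) := by unfold Spec_restore_rule_based_py; infer_instance

-- ===== CLAIM (what is proved, stated in full; the proofs are below) =====
def Claim_equal_restore_rule_based_py : Prop := ∀ (text : String), Dom_restore_rule_based_py text → Spec_restore_rule_based_py text (restore_rule_based_py text)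

-- ===== LEMMAS AND PROOFS =====

-- canonical decoration: word at index i gets '.' iff (i+1) % 15 == 0, i < n-1, no dot-like end
def pvDec (n : Int) : Int → List String → List String
  | _, [] => []
  | i, w :: ws =>
      (if (PySem.Int.mod (i + 1) 15 = 0 ∧ i < n - 1) ∧ pvEnds4 w = false then w ++ "." else w)
        :: pvDec n (i + 1) ws

theorem pvDec_nil (n i : Int) : pvDec n i [] = [] := rfl

theorem pvDec_cons (n i : Int) (w : String) (ws : List String) :
    pvDec n i (w :: ws) =
      (if (PySem.Int.mod (i + 1) 15 = 0 ∧ i < n - 1) ∧ pvEnds4 w = false then w ++ "." else w)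
        :: pvDec n (i + 1) ws := rfl

theorem pvDec_length (n : Int) : ∀ (ws : List String) (i : Int), (pvDec n i ws).length = ws.length := by
  intro ws
  induction ws with
  | nil => intro i; rfl
  | cons w ws ih => intro i; simp [pvDec_cons, ih]

theorem pvDec_append (n : Int) (as bs : List String) : ∀ i : Int,
    pvDec n i (as ++ bs) = pvDec n i as ++ pvDec n (i + as.length) bs := by
  induction as with
  | nil => intro i; simp [pvDec]
  | cons a as ih =>
      intro i
      simp only [List.cons_append, pvDec_cons, ih (i + 1), List.length_cons]
      have e : i + 1 + (as.length : Int) = i + ((as.length + 1 : Nat) : Int) := by push_cast; ring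
      rw [e]

theorem pvDec_id (n : Int) : ∀ (ws : List String) (i : Int),
    (∀ j : Nat, j < ws.length → ¬(PySem.Int.mod (i + j + 1) 15 = 0 ∧ i + j < n - 1)) →
    pvDec n i ws = ws := by
  intro ws
  induction ws with
  | nil => intro i _; rfl
  | cons w ws ih =>
      intro i h
      have h0 := h 0 (by simp)
      simp only [Nat.cast_zero, add_zero] at h0
      rw [pvDec_cons, if_neg (by tauto), ih (i + 1) ?_]
      intro j hj
      have hh := h (j + 1) (by simpa using hj)
      have e1 : i + 1 + (j : Int) + 1 = i + ((j : Int) + 1) + 1 := by ring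
      have e2 : i + 1 + (j : Int) = i + ((j : Int) + 1) := by ring
      rw [e1, e2]
      exact_mod_cast hh

-- a 15-word group before the dotting position: only its last word is decorated
theorem pvDec_chunk (n s : Int) (g : List String) (hne : g ≠ []) (hg : g.length = 15)
    (hs : s % 15 = 0) (hlt : s + 15 < n) :
    pvDec n s g =
      g.dropLast ++ [if pvEnds4 (g.getLast hne) = false then g.getLast hne ++ "." else g.getLast hne] := by
  conv_lhs => rw [← List.dropLast_append_getLast hne]
  rw [pvDec_append]
  have hlen : (g.dropLast.length : Int) = 14 := by
    have := @List.length_dropLast _ g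
    omega
  rw [hlen]
  have h1 : pvDec n s g.dropLast = g.dropLast := by
    apply pvDec_id
    intro j hj
    rw [PySem.Int.mod_eq_emod_of_pos (by norm_num : (0:Int) < 15)]
    have hj14 : j < 14 := by
      have := @List.length_dropLast _ g
      omega
    omega
  have hc1 : (15:Int) ∣ s + 14 + 1 := by omega
  have hc2 : s + 14 < n - 1 := by omega
  rw [h1, pvDec_cons, pvDec_nil]
  simp [hc1, hc2]

-- the tail (the final group): nothing is decorated
theorem pvDec_tail (n s : Int) (ws : List String) (h1 : n ≤ s + 15) (hs : s % 15 = 0) :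
    pvDec n s ws = ws := by
  apply pvDec_id
  intro j _
  rw [PySem.Int.mod_eq_emod_of_pos (by norm_num : (0:Int) < 15)]
  omega

-- A's loop produces the canonical decoration
theorem pvA_loop (N : Int) : ∀ (ws : List String) (i : Int) (res : List String),
    (PySem.List.enumerate ws i).foldl (pvStepA N) res = res ++ pvDec N i ws := by
  intro ws
  induction ws with
  | nil => intro i res; simp [PySem.List.enumerate_nil, pvDec]
  | cons w ws ih =>
      intro i res
      rw [PySem.List.enumerate_cons, List.foldl_cons, ih (i + 1), pvDec_cons]
      by_cases h1a : (15:Int) ∣ i + 1 <;> by_cases h1b : i < N - 1 <;>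
        by_cases h2 : pvEnds4 w = false <;>
        simp [pvStepA, h1a, h1b, h2, List.dropLast_concat]

-- range(0, n, 15) induction forms
theorem pvRange15_nil (a b : Int) (h : b ≤ a) : PySem.List.pyRange a b 15 = [] := by
  rw [PySem.List.pyRange_of_pos a b (by norm_num)]
  simp [show ¬(a < b) by omega]

theorem pvRange15_cons (a b : Int) (h : a < b) :
    PySem.List.pyRange a b 15 = a :: PySem.List.pyRange (a + 15) b 15 := by
  rw [PySem.List.pyRange_of_pos a b (by norm_num), PySem.List.pyRange_of_pos (a + 15) b (by norm_num)]
  rw [if_pos h]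
  by_cases h2 : a + 15 < b
  · rw [if_pos h2]
    have hN : ((b - a + 15 - 1) / 15).toNat = ((b - (a + 15) + 15 - 1) / 15).toNat + 1 := by omega
    rw [hN, List.range_succ_eq_map, List.map_cons, List.map_map]
    congr 1
    · norm_num
    · apply List.map_congr_left
      intro k _
      simp only [Function.comp_apply, Nat.succ_eq_add_one]
      push_cast
      ring
  · rw [if_neg h2]
    have hN : ((b - a + 15 - 1) / 15).toNat = 1 := by omega
    rw [hN]
    simp

-- B's chunk loop also produces the canonical decoration
theorem pvB_loop (words : List String) : ∀ (fuel : Nat) (s : Int) (out : List String),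
    0 ≤ s → s % 15 = 0 → (words.length : Int) - s ≤ fuel →
    (PySem.List.pyRange s (words.length : Int) 15).foldl (pvStepB words) out
      = out ++ pvDec (words.length : Int) s (words.drop s.toNat) := by
  intro fuel
  induction fuel with
  | zero =>
      intro s out h0 _ hf
      rw [pvRange15_nil _ _ (by omega), List.foldl_nil,
        List.drop_eq_nil_of_le (by omega), pvDec_nil, List.append_nil]
  | succ fuel ih =>
      intro s out h0 hs hf
      by_cases hend : (words.length : Int) ≤ s
      · rw [pvRange15_nil _ _ hend, List.foldl_nil,
          List.drop_eq_nil_of_le (by omega), pvDec_nil, List.append_nil]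
      · rw [pvRange15_cons _ _ (by omega), List.foldl_cons,
          ih (s + 15) _ (by omega) (by omega) (by omega)]
        have hslice : PySem.List.slice words (some s) (some (s + 15))
            = (words.drop s.toNat).take 15 := by
          rw [PySem.List.slice_toNat words h0 (by omega)]
          congr 1
          omega
        have hdrop : words.drop (s + 15).toNat = (words.drop s.toNat).drop 15 := by
          rw [List.drop_drop]
          congr 1
          omega
        set ws := words.drop s.toNat with hws
        have hwslen : ws.length = words.length - s.toNat := by
          rw [hws, List.length_drop]
        by_cases hfull : s + 15 < (words.length : Int)
        · -- a complete, non-final group: its last word is decorated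
          have hg : ((ws.take 15).length = 15) := by
            rw [List.length_take]
            omega
          have hgne : ws.take 15 ≠ [] := by
            intro hgeq
            rw [hgeq] at hg
            simp at hg
          obtain ⟨as, l, hasl⟩ : ∃ as l, ws.take 15 = as ++ [l] :=
            ⟨(ws.take 15).dropLast, (ws.take 15).getLast hgne,
              (List.dropLast_append_getLast hgne).symm⟩
          have hsplit : ws = (as ++ [l]) ++ ws.drop 15 := by
            rw [← hasl]
            exact (List.take_append_drop 15 ws).symm
          rw [hdrop]
          conv_rhs => rw [hsplit]
          rw [pvDec_append]
          have hlen : (((as ++ [l]).length : Nat) : Int) = 14 + 1 := by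
            rw [← hasl, hg]
            rfl
          rw [hlen]
          have hchunk := pvDec_chunk (↑words.length) s (as ++ [l]) (by simp)
            (by rw [← hasl]; exact hg) hs hfull
          simp only [List.dropLast_concat, List.getLast_concat] at hchunk
          have hadd : s + (14 + 1) = s + 15 := by ring
          rw [hadd, hchunk, pvStepB, hslice, hasl,
            PySem.List.pyGetD_neg_one_append_singleton]
          by_cases he : pvEnds4 l = false
          · rw [if_pos (And.intro hfull he), if_pos he]
            simp
          · rw [if_neg (by tauto), if_neg (by simpa using he)]
            simp
        · -- the final group: taken whole, nothing decorated here
          have htake : ws.take 15 = ws := List.take_of_length_le (by omega)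
          have hnil : words.drop (s + 15).toNat = [] :=
            List.drop_eq_nil_of_le (by omega)
          rw [hnil, pvDec_nil, List.append_nil, pvStepB, hslice, htake,
            if_neg (by tauto), pvDec_tail _ _ _ (by omega) hs]

-- ===== VERDICT (by name: the statement is the Claim_ definition above) =====
theorem restore_rule_based_py_spec : Claim_equal_restore_rule_based_py := by
  intro text _
  unfold Spec_restore_rule_based_py restore_rule_based_py restore_rule_based_py_alt
  dsimp only
  by_cases hw : PySem.Str.split₀ text = []
  · simp [hw, PySem.List.enumerate_nil]
    rfl
  · rw [if_neg hw]
    rw [pvA_loop, pvB_loop _ (PySem.Str.split₀ text).length 0 [] le_rfl (by decide) (by omega)]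
    set words := PySem.Str.split₀ text with hwords
    simp only [Int.toNat_zero, List.drop_zero, List.nil_append]
    have hne : pvDec (words.length : Int) 0 words ≠ [] := by
      intro habs
      have hlen := pvDec_length (words.length : Int) words 0
      rw [habs] at hlen
      simp at hlen
      exact hw (List.length_eq_zero_iff.mp hlen.symm)
    simp [hne]
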